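-- pv_equiv track=rewrite | github.com/shs395/algorithm | programmers/Lv2/무인도_여행.py | solution
-- ===== SOURCE A (Python) =====
-- dx = [1, -1, 0, 0]
--
-- dy = [0, 0, -1, 1]
--
-- def dfs(i, j, visited, arr):
--     x = 0
--     for idx in range(4):
--         ni = i + dx[idx]
--         nj = j + dy[idx]
--         if 0 <= ni < len(arr) and 0 <= nj < len(arr[0]) and visited[ni][nj] == False and arr[ni][nj] != 'X':
--             visited[ni][nj] = True
--             x += dfs(ni, nj, visited, arr)
--
--     return int(arr[i][j]) + x
--
-- def solution(maps):
--     answer = []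
--
--     arr = []
--     for x in maps:
--         arr.append(list(x))
--
--     visited = [[False for _ in range(len(arr[0]))] for _ in range(len(arr))]
--
--     for i in range(len(arr)):
--         for j in range(len(arr[0])):
--             if visited[i][j] == False and arr[i][j] != 'X':
--                 visited[i][j] = True
--                 answer.append(dfs(i, j, visited, arr))
--
--     answer.sort()
--
--     if len(answer) == 0:
--         return [-1]
--     return answer
-- ===== SOURCE B (Python) =====
-- def solution(maps):
--     arr = [list(x) for x in maps]
--     n = len(arr)
--     m = len(arr[0]) if arr else 0
--     visited = [[False] * m for _ in range(n)]
--     answer = []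
--     for i in range(n):
--         for j in range(m):
--             if visited[i][j] or arr[i][j] == 'X':
--                 continue
--             total = 0
--             stack = [(i, j)]
--             while stack:
--                 ci, cj = stack.pop()
--                 if visited[ci][cj]:
--                     continue
--                 visited[ci][cj] = True
--                 total += int(arr[ci][cj])
--                 for di, dj in ((0, 1), (0, -1), (-1, 0), (1, 0)):
--                     ni, nj = ci + di, cj + dj
--                     if 0 <= ni < n and 0 <= nj < m and not visited[ni][nj] and arr[ni][nj] != 'X':
--                         stack.append((ni, nj))
--             answer.append(total)
--     answer.sort()
--     return answer if answer else [-1]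
-- ===== Notes on version B (the rewrite author's own statement) =====
-- stated objective: idiomatic
-- what changed: Replaces the recursive DFS helper (mark-before-recurse, per-call digit accumulation) with an iterative flood fill that keeps an explicit stack inside the scan loop, checking and marking cells at pop time.
import Mathlib
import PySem

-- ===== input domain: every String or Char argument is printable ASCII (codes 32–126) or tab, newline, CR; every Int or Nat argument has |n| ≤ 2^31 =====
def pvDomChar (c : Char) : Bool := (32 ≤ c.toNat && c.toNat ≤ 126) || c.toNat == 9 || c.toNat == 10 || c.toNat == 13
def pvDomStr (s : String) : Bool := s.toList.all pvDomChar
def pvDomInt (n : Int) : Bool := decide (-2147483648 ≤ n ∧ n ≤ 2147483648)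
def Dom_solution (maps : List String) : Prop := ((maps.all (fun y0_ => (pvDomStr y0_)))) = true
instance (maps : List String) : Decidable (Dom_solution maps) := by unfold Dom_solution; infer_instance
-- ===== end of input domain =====

-- B replaces A's recursive DFS helper by an iterative stack-based flood fill (mark/count at pop time); same cost, more idiomatic.

-- ===== PORT A =====
-- Shared low-level model of the mutable Python state: `visited` is a list of Bool rows,
-- read/written only at indices the Python code has bounds-checked (vget defaults to
-- `true` and vset is a no-op outside those bounds, which no admitted run reaches).
def vget (V : List (List Bool)) (i j : Int) : Bool :=
  if 0 ≤ i ∧ 0 ≤ j then (V.getD i.toNat []).getD j.toNat true else true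

def vset (V : List (List Bool)) (i j : Int) : List (List Bool) :=
  V.set i.toNat ((V.getD i.toNat []).set j.toNat true)

-- number of unvisited entries (termination measure only)
def ucount (V : List (List Bool)) : Nat := (V.map (fun r => r.count false)).sum

-- 0 <= i < len(arr) and 0 <= j < len(arr[0])
def inbB (arr : List (List Char)) (i j : Int) : Bool :=
  decide (0 ≤ i) && decide (i < (arr.length : Int)) && decide (0 ≤ j) && decide (j < ((arr.getD 0 []).length : Int))

-- arr[i][j], read only at bounds-checked indices
def aget (arr : List (List Char)) (i j : Int) : Char := (arr.getD i.toNat []).getD j.toNat 'X'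

-- int(c) for a one-digit character c; exact on '0'..'9', which Pre_ guarantees at every use
def digitVal (c : Char) : Int := (c.toNat : Int) - 48

-- A's dx/dy pairs, in idx order 0..3
def dirsA : List (Int × Int) := [(1, 0), (-1, 0), (0, -1), (0, 1)]

-- visited grows pointwise (termination/monotonicity evidence carried by the A-port)
def Vle (V V' : List (List Bool)) : Prop := ∀ i j : Int, vget V i j = true → vget V' i j = true

theorem Vle_refl (V : List (List Bool)) : Vle V V := fun _ _ h => h

theorem Vle_trans {V1 V2 V3 : List (List Bool)} (h1 : Vle V1 V2) (h2 : Vle V2 V3) : Vle V1 V3 :=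
  fun i j h => h2 i j (h1 i j h)

theorem getD_set_self {α : Type} (l : List α) (n : Nat) (a d : α) (h : n < l.length) :
    (l.set n a).getD n d = a := by
  have : (l.set n a)[n]? = some a := List.getElem?_set_self h
  rw [List.getD_eq_getElem?_getD, this, Option.getD_some]

theorem getD_set_of_ne {α : Type} (l : List α) (n m : Nat) (a d : α) (h : n ≠ m) :
    (l.set n a).getD m d = l.getD m d := by
  simp [List.getD_eq_getElem?_getD, List.getElem?_set_ne h]

theorem vget_vset_other (V : List (List Bool)) (i j a b : Int)
    (h : vget V a b = true) : vget (vset V i j) a b = true := by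
  unfold vget at h ⊢
  split
  · rename_i hab
    rw [if_pos hab] at h
    unfold vset
    by_cases hi : i.toNat = a.toNat
    · rw [← hi] at h ⊢
      by_cases hl : i.toNat < V.length
      · rw [getD_set_self _ _ _ _ hl]
        by_cases hj : j.toNat = b.toNat
        · rw [← hj] at h ⊢
          by_cases hjl : j.toNat < (V.getD i.toNat []).length
          · rw [getD_set_self _ _ _ _ hjl]
          · rw [List.set_eq_of_length_le (by omega)]; exact h
        · rw [getD_set_of_ne _ _ _ _ _ hj]; exact h
      · rw [List.set_eq_of_length_le (by omega)]; exact h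
    · rw [getD_set_of_ne _ _ _ _ _ hi]; exact h
  · rfl

theorem Vle_vset (V : List (List Bool)) (i j : Int) : Vle V (vset V i j) :=
  fun a b h => vget_vset_other V i j a b h

theorem vget_false_bounds (V : List (List Bool)) (i j : Int) (h : vget V i j = false) :
    0 ≤ i ∧ 0 ≤ j ∧ i.toNat < V.length ∧ j.toNat < (V.getD i.toNat []).length ∧
      (V.getD i.toNat []).getD j.toNat true = false := by
  unfold vget at h
  split at h
  · rename_i hab
    have hrow : i.toNat < V.length := by
      by_contra hl
      have hr : V.getD i.toNat [] = [] := by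
        rw [List.getD_eq_getElem?_getD, List.getElem?_eq_none (by omega)]; rfl
      rw [hr] at h; simp at h
    have hcol : j.toNat < (V.getD i.toNat []).length := by
      by_contra hl
      rw [List.getD_eq_getElem?_getD, List.getElem?_eq_none (by omega)] at h
      simp at h
    exact ⟨hab.1, hab.2, hrow, hcol, h⟩
  · simp at h

theorem rowcount_set_lt (r : List Bool) (b : Nat) (h : r.getD b true = false) :
    (r.set b true).count false < r.count false := by
  induction r generalizing b with
  | nil => simp at h
  | cons c t ih =>
    cases b with
    | zero =>
      simp at h; subst h
      simp
    | succ b' =>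
      simp only [List.getD_cons_succ] at h
      have := ih b' h
      cases c <;> simp [List.set] <;> omega

theorem ucount_set_lt (V : List (List Bool)) (a b : Nat)
    (h : (V.getD a []).getD b true = false) :
    ucount (V.set a ((V.getD a []).set b true)) < ucount V := by
  induction V generalizing a with
  | nil => simp at h
  | cons r t ih =>
    cases a with
    | zero =>
      simp only [List.getD_cons_zero] at h
      simp only [List.getD_cons_zero, List.set_cons_zero, ucount, List.map, List.sum_cons]
      have := rowcount_set_lt r b h
      omega
    | succ a' =>
      simp only [List.getD_cons_succ] at h
      have := ih a' h
      simp only [List.getD_cons_succ, List.set_cons_succ, ucount, List.map, List.sum_cons] at *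
      omega

theorem ucount_vset_lt (V : List (List Bool)) (i j : Int) (h : vget V i j = false) :
    ucount (vset V i j) < ucount V := by
  obtain ⟨_, _, _, _, hg⟩ := vget_false_bounds V i j h
  exact ucount_set_lt V i.toNat j.toNat hg

-- literal transliteration of A's `dfs`: the `for idx in range(4)` loop is the list `ds`
-- of remaining (dx[idx], dy[idx]) pairs; the subtype carries only termination evidence.
def dfsAux (arr : List (List Char)) (i j : Int) (ds : List (Int × Int)) (V : List (List Bool)) :
    {p : List (List Bool) × Int // ucount p.1 ≤ ucount V ∧ Vle V p.1} :=
  match ds with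
  | [] => ⟨(V, 0), le_refl _, Vle_refl V⟩
  | d :: ds' =>
    have hlt : ∀ h : vget V (i + d.1) (j + d.2) = false,
        ucount (vset V (i + d.1) (j + d.2)) < ucount V := fun h => ucount_vset_lt V _ _ h
    if h : inbB arr (i + d.1) (j + d.2) = true ∧ vget V (i + d.1) (j + d.2) = false ∧
        aget arr (i + d.1) (j + d.2) ≠ 'X' then
      match dfsAux arr (i + d.1) (j + d.2) dirsA (vset V (i + d.1) (j + d.2)) with
      | ⟨(V2, x2), h2⟩ =>
        match dfsAux arr i j ds' V2 with
        | ⟨(V3, x3), h3⟩ =>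
          ⟨(V3, (digitVal (aget arr (i + d.1) (j + d.2)) + x2) + x3), by
            refine ⟨?_, ?_⟩
            · have := hlt h.2.1; have := h2.1; have := h3.1; simp only at *; omega
            · exact Vle_trans (Vle_vset V _ _) (Vle_trans h2.2 h3.2)⟩
    else dfsAux arr i j ds' V
termination_by (5 * ucount V + ds.length : Nat)
decreasing_by
  · have := hlt h.2.1
    simp only [dirsA, List.length_cons, List.length_nil]
    omega
  · have h0 := hlt h.2.1
    have hh : ucount V2 ≤ ucount (vset V (i + d.1) (j + d.2)) := by simpa using h2.1
    simp only [List.length_cons]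
    omega
  · simp only [List.length_cons]; omega

-- dfs(i, j, visited, arr) itself: the loop sum plus int(arr[i][j])
def dfsA (arr : List (List Char)) (i j : Int) (V : List (List Bool)) : List (List Bool) × Int :=
  let r := dfsAux arr i j dirsA V
  (r.1.1, digitVal (aget arr i j) + r.1.2)

-- solution(maps), statement for statement
def solution (maps : List String) : List Int :=
  let arr := maps.foldl (fun a x => a ++ [x.toList]) ([] : List (List Char))
  let visited0 := (List.range arr.length).map (fun _ => (List.range ((arr.getD 0 []).length)).map (fun _ => false))
  let st := (PySem.List.pyRange 0 (arr.length : Int) 1).foldl (fun st i =>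
      (PySem.List.pyRange 0 (((arr.getD 0 []).length : Int)) 1).foldl (fun st j =>
        if vget st.1 i j = false ∧ aget arr i j ≠ 'X' then
          let V1 := vset st.1 i j
          let r := dfsA arr i j V1
          (r.1, st.2 ++ [r.2])
        else st) st) (visited0, ([] : List Int))
  let answer := PySem.List.sorted st.2 (fun x => x) false
  if answer.length = 0 then [-1] else answer

-- ===== PORT B =====
-- B's neighbour-push loop: for (di,dj) in ((0,1),(0,-1),(-1,0),(1,0)) append eligible cells
def dirsB : List (Int × Int) := [(0, 1), (0, -1), (-1, 0), (1, 0)]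

def nbrsB (arr : List (List Char)) (V : List (List Bool)) (ci cj : Int) : List (Int × Int) :=
  dirsB.foldl (fun acc d =>
    if inbB arr (ci + d.1) (cj + d.2) = true ∧ vget V (ci + d.1) (cj + d.2) = false ∧
        aget arr (ci + d.1) (cj + d.2) ≠ 'X' then acc ++ [(ci + d.1, cj + d.2)]
    else acc) []

theorem length_nbrsB_le (arr : List (List Char)) (V : List (List Bool)) (ci cj : Int) :
    (nbrsB arr V ci cj).length ≤ 4 := by
  simp only [nbrsB, dirsB, List.foldl]
  split_ifs <;> simp

-- B's `while stack:` loop; the Lean list head is the Python stack top, so the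
-- appended neighbour block enters reversed.
def goB (arr : List (List Char)) (stack : List (Int × Int)) (V : List (List Bool)) (total : Int) :
    List (List Bool) × Int :=
  match stack with
  | [] => (V, total)
  | c :: rest =>
    if _h : vget V c.1 c.2 = true then goB arr rest V total
    else
      goB arr ((nbrsB arr (vset V c.1 c.2) c.1 c.2).reverse ++ rest) (vset V c.1 c.2)
        (total + digitVal (aget arr c.1 c.2))
termination_by (5 * ucount V + stack.length)
decreasing_by
  · simp only [List.length_cons]; omega
  · have h1 : ucount (vset V c.1 c.2) < ucount V :=
      ucount_vset_lt V c.1 c.2 (by simpa using _h)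
    have h2 := length_nbrsB_le arr (vset V c.1 c.2) c.1 c.2
    simp only [List.length_append, List.length_reverse, List.length_cons]
    omega

-- solution(maps), B's shape: scan, and an explicit stack instead of recursion;
-- `m = len(arr[0]) if arr else 0` is `(arr.getD 0 []).length`
def solution_alt (maps : List String) : List Int :=
  let arr := maps.map (fun x => x.toList)
  let visited0 := (List.range arr.length).map (fun _ => List.replicate ((arr.getD 0 []).length) false)
  let st := (PySem.List.pyRange 0 (arr.length : Int) 1).foldl (fun st i =>
      (PySem.List.pyRange 0 (((arr.getD 0 []).length : Int)) 1).foldl (fun st j =>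
        if vget st.1 i j = true ∨ aget arr i j = 'X' then st
        else
          let r := goB arr [(i, j)] st.1 0
          (r.1, st.2 ++ [r.2])) st) (visited0, ([] : List Int))
  let answer := PySem.List.sorted st.2 (fun x => x) false
  if answer.isEmpty = true then [-1] else answer

-- ===== PRECONDITION & SPEC =====
-- Pre_ excludes exactly the inputs where Python A raises: a row shorter than row 0
-- (IndexError when the scan reads it) or a scanned non-'X' character that is not a
-- decimal digit (ValueError in int()).
def Pre_solution (maps : List String) : Prop :=
  (maps.all (fun s =>
    decide ((maps.getD 0 "").toList.length ≤ s.toList.length) &&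
    (s.toList.take ((maps.getD 0 "").toList.length)).all
      (fun c => c == 'X' || (decide ('0' ≤ c) && decide (c ≤ '9'))))) = true

instance (maps : List String) : Decidable (Pre_solution maps) := by
  unfold Pre_solution; infer_instance

def pvWitness_solution : List String := ["01X", "X0X"]

def Spec_solution (maps : List String) (out : List Int) : Prop := out = solution_alt maps
instance (maps : List String) (out : List Int) : Decidable (Spec_solution maps out) := by
  unfold Spec_solution; infer_instance

-- ===== CLAIM (what is proved, stated in full; the proofs are below) =====
def Claim_equal_solution : Prop := ∀ (maps : List String), Dom_solution maps → Pre_solution maps → Spec_solution maps (solution maps)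

-- ===== LEMMAS AND PROOFS =====
theorem goB_nil (arr : List (List Char)) (V : List (List Bool)) (t : Int) : goB arr [] V t = (V, t) := by
  simp [goB]

theorem goB_cons_skip (arr : List (List Char)) (c : Int × Int) (rest : List (Int × Int)) (V : List (List Bool)) (t : Int)
    (h : vget V c.1 c.2 = true) : goB arr (c :: rest) V t = goB arr rest V t := by
  rw [goB.eq_def]
  simp [h]

theorem goB_cons_proc (arr : List (List Char)) (c : Int × Int) (rest : List (Int × Int)) (V : List (List Bool)) (t : Int)
    (h : vget V c.1 c.2 = false) : goB arr (c :: rest) V t =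
      goB arr ((nbrsB arr (vset V c.1 c.2) c.1 c.2).reverse ++ rest) (vset V c.1 c.2) (t + digitVal (aget arr c.1 c.2)) := by
  rw [goB.eq_def]
  simp [h]

-- proof-side plain-pair view of dfsAux
def dfsv (arr : List (List Char)) (i j : Int) (ds : List (Int × Int)) (V : List (List Bool)) :
    List (List Bool) × Int := (dfsAux arr i j ds V).1

theorem ucount_dfsv_le (arr : List (List Char)) (i j : Int) (ds : List (Int × Int)) (V : List (List Bool)) :
    ucount (dfsv arr i j ds V).1 ≤ ucount V := (dfsAux arr i j ds V).2.1

theorem Vle_dfsv (arr : List (List Char)) (i j : Int) (ds : List (Int × Int)) (V : List (List Bool)) :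
    Vle V (dfsv arr i j ds V).1 := (dfsAux arr i j ds V).2.2

theorem dfsv_nil (arr : List (List Char)) (i j : Int) (V : List (List Bool)) : dfsv arr i j [] V = (V, 0) := by
  rw [dfsv, dfsAux.eq_def]

theorem dfsv_cons_neg (arr : List (List Char)) (i j : Int) (d : Int × Int) (ds' : List (Int × Int)) (V : List (List Bool))
    (h : ¬ (inbB arr (i + d.1) (j + d.2) = true ∧ vget V (i + d.1) (j + d.2) = false ∧ aget arr (i + d.1) (j + d.2) ≠ 'X')) :
    dfsv arr i j (d :: ds') V = dfsv arr i j ds' V := by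
  rw [dfsv, dfsAux.eq_def]
  simp [h]
  rfl

theorem dfsv_cons_pos (arr : List (List Char)) (i j : Int) (d : Int × Int) (ds' : List (Int × Int)) (V : List (List Bool))
    (h : inbB arr (i + d.1) (j + d.2) = true ∧ vget V (i + d.1) (j + d.2) = false ∧ aget arr (i + d.1) (j + d.2) ≠ 'X') :
    dfsv arr i j (d :: ds') V =
      ((dfsv arr i j ds' (dfsv arr (i + d.1) (j + d.2) dirsA (vset V (i + d.1) (j + d.2))).1).1,
        (digitVal (aget arr (i + d.1) (j + d.2)) + (dfsv arr (i + d.1) (j + d.2) dirsA (vset V (i + d.1) (j + d.2))).2)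
          + (dfsv arr i j ds' (dfsv arr (i + d.1) (j + d.2) dirsA (vset V (i + d.1) (j + d.2))).1).2) := by
  rcases hR : dfsAux arr (i + d.1) (j + d.2) dirsA (vset V (i + d.1) (j + d.2)) with ⟨⟨V2, x2⟩, hp⟩
  rcases hS : dfsAux arr i j ds' V2 with ⟨⟨V3, x3⟩, hq⟩
  have hR' : dfsv arr (i + d.1) (j + d.2) dirsA (vset V (i + d.1) (j + d.2)) = (V2, x2) := by rw [dfsv, hR]
  have hS' : dfsv arr i j ds' V2 = (V3, x3) := by rw [dfsv, hS]
  conv_lhs => rw [dfsv, dfsAux.eq_def]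
  dsimp only
  rw [dif_pos h, hR]
  dsimp only
  rw [hS]
  simp [hR', hS']

def cellsOf (i j : Int) (ds : List (Int × Int)) : List (Int × Int) :=
  ds.map (fun d => (i + d.1, j + d.2))

def eligb (arr : List (List Char)) (V : List (List Bool)) (c : Int × Int) : Bool :=
  inbB arr c.1 c.2 && !(vget V c.1 c.2) && decide (aget arr c.1 c.2 ≠ 'X')

theorem eligb_eq_true_iff (arr : List (List Char)) (V : List (List Bool)) (c : Int × Int) :
    eligb arr V c = true ↔
      (inbB arr c.1 c.2 = true ∧ vget V c.1 c.2 = false ∧ aget arr c.1 c.2 ≠ 'X') := by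
  simp [eligb, Bool.and_eq_true, and_assoc]

inductive Skel (arr : List (List Char)) :
    List (List Bool) → List (Int × Int) → List (Int × Int) → Prop
  | nil (V) : Skel arr V [] []
  | keep (V c cs cs') : aget arr c.1 c.2 ≠ 'X' → inbB arr c.1 c.2 = true →
      Skel arr V cs cs' → Skel arr V (c :: cs) (c :: cs')
  | drop (V c cs cs') :
      ¬ (inbB arr c.1 c.2 = true ∧ vget V c.1 c.2 = false ∧ aget arr c.1 c.2 ≠ 'X') →
      Skel arr V cs cs' → Skel arr V (c :: cs) cs'

theorem Skel_mono {arr : List (List Char)} {V V' : List (List Bool)} {cs cs' : List (Int × Int)}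
    (hle : Vle V V') (h : Skel arr V cs cs') : Skel arr V' cs cs' := by
  induction h with
  | nil => exact Skel.nil _
  | keep c cs cs' hX hIn _ ih => exact Skel.keep _ _ _ _ hX hIn ih
  | drop c cs cs' hne _ ih =>
    refine Skel.drop _ _ _ _ ?_ ih
    rintro ⟨h1, h2, h3⟩
    apply hne
    refine ⟨h1, ?_, h3⟩
    cases hvg : vget V c.1 c.2
    · rfl
    · exact absurd (hle _ _ hvg) (by rw [h2]; simp)

theorem Skel_filter (arr : List (List Char)) (V : List (List Bool)) (cs : List (Int × Int)) :
    Skel arr V cs (cs.filter (eligb arr V)) := by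
  induction cs with
  | nil => exact Skel.nil _
  | cons c cs ih =>
    by_cases h : eligb arr V c = true
    · rw [List.filter_cons_of_pos h]
      have h' := (eligb_eq_true_iff arr V c).mp h
      exact Skel.keep _ _ _ _ h'.2.2 h'.1 ih
    · rw [List.filter_cons_of_neg (by simpa using h)]
      exact Skel.drop _ _ _ _ (fun hc => h ((eligb_eq_true_iff arr V c).mpr hc)) ih

theorem foldl_push_eq_filter (arr : List (List Char)) (V : List (List Bool))
    (l : List (Int × Int)) (ci cj : Int) (init : List (Int × Int)) :
    l.foldl (fun acc d =>
      if inbB arr (ci + d.1) (cj + d.2) = true ∧ vget V (ci + d.1) (cj + d.2) = false ∧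
          aget arr (ci + d.1) (cj + d.2) ≠ 'X' then acc ++ [(ci + d.1, cj + d.2)]
      else acc) init
    = init ++ (cellsOf ci cj l).filter (eligb arr V) := by
  induction l generalizing init with
  | nil => simp [cellsOf]
  | cons d l ih =>
    simp only [List.foldl_cons, cellsOf, List.map_cons, List.filter_cons]
    by_cases h : inbB arr (ci + d.1) (cj + d.2) = true ∧ vget V (ci + d.1) (cj + d.2) = false ∧
        aget arr (ci + d.1) (cj + d.2) ≠ 'X'
    · rw [if_pos h, ih]
      have he : eligb arr V (ci + d.1, cj + d.2) = true :=
        (eligb_eq_true_iff _ _ _).mpr (by simpa using h)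
      rw [he]
      simp [cellsOf]
    · rw [if_neg h, ih]
      have he : eligb arr V (ci + d.1, cj + d.2) = false := by
        rw [← Bool.not_eq_true, eligb_eq_true_iff]; simpa using h
      rw [he]
      simp [cellsOf]

theorem nbrsB_rev (arr : List (List Char)) (V : List (List Bool)) (ci cj : Int) :
    (nbrsB arr V ci cj).reverse = (cellsOf ci cj dirsA).filter (eligb arr V) := by
  have h1 : nbrsB arr V ci cj = (cellsOf ci cj dirsB).filter (eligb arr V) := by
    simpa using foldl_push_eq_filter arr V dirsB ci cj []
  rw [h1, ← List.filter_reverse]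
  congr 1

theorem SIM (arr : List (List Char)) :
    ∀ (u : Nat) (V : List (List Bool)), ucount V < u →
      ∀ (ds : List (Int × Int)) (i j : Int) (cs' rest : List (Int × Int)) (total : Int),
        Skel arr V (cellsOf i j ds) cs' →
        goB arr (cs' ++ rest) V total =
          goB arr rest (dfsv arr i j ds V).1 (total + (dfsv arr i j ds V).2) := by
  intro u
  induction u with
  | zero => intro V h; exact absurd h (Nat.not_lt_zero _)
  | succ u ih =>
    intro V hu ds
    induction ds with
    | nil =>
      intro i j cs' rest total hsk
      simp only [cellsOf, List.map_nil] at hsk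
      cases hsk
      rw [List.nil_append, dfsv_nil]
      simp
    | cons d ds' ihds =>
      intro i j cs' rest total hsk
      simp only [cellsOf, List.map_cons] at hsk
      cases hsk with
      | keep _ _ cs2 hX hIn hsk2 =>
        by_cases hv : vget V (i + d.1) (j + d.2) = true
        · rw [List.cons_append, goB_cons_skip _ _ _ _ _ hv]
          rw [dfsv_cons_neg _ _ _ _ _ _ (by rintro ⟨_, h2, _⟩; rw [hv] at h2; cases h2)]
          exact ihds i j cs2 rest total hsk2
        · have hv' : vget V (i + d.1) (j + d.2) = false := by simpa using hv
          rw [List.cons_append, goB_cons_proc _ _ _ _ _ hv']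
          have hu1 : ucount (vset V (i + d.1) (j + d.2)) < u := by
            have := ucount_vset_lt V _ _ hv'
            omega
          have hskn : Skel arr (vset V (i + d.1) (j + d.2))
              (cellsOf (i + d.1) (j + d.2) dirsA)
              ((nbrsB arr (vset V (i + d.1) (j + d.2)) (i + d.1) (j + d.2)).reverse) := by
            rw [nbrsB_rev]
            exact Skel_filter _ _ _
          rw [ih _ hu1 dirsA (i + d.1) (j + d.2) _ (cs2 ++ rest) _ hskn]
          have hle : Vle V (dfsv arr (i + d.1) (j + d.2) dirsA (vset V (i + d.1) (j + d.2))).1 :=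
            Vle_trans (Vle_vset V _ _) (Vle_dfsv _ _ _ _ _)
          have hu2 : ucount (dfsv arr (i + d.1) (j + d.2) dirsA (vset V (i + d.1) (j + d.2))).1 < u := by
            have := ucount_dfsv_le arr (i + d.1) (j + d.2) dirsA (vset V (i + d.1) (j + d.2))
            omega
          rw [ih _ hu2 ds' i j cs2 rest _ (Skel_mono hle hsk2)]
          rw [dfsv_cons_pos _ _ _ _ _ _ ⟨hIn, hv', hX⟩]
          congr 1
          ring
      | drop _ _ _ hne2 hsk2 =>
        rw [dfsv_cons_neg _ _ _ _ _ _ hne2]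
        exact ihds i j _ rest total hsk2

theorem goB_single (arr : List (List Char)) (i j : Int) (V : List (List Bool))
    (h : vget V i j = false) :
    goB arr [(i, j)] V 0 = dfsA arr i j (vset V i j) := by
  rw [goB_cons_proc arr (i, j) [] V 0 h]
  dsimp only
  have hsk : Skel arr (vset V i j) (cellsOf i j dirsA)
      ((nbrsB arr (vset V i j) i j).reverse) := by
    rw [nbrsB_rev]; exact Skel_filter _ _ _
  rw [SIM arr (ucount (vset V i j) + 1) (vset V i j) (Nat.lt_succ_self _) dirsA i j
      ((nbrsB arr (vset V i j) i j).reverse) [] (0 + digitVal (aget arr i j)) hsk]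
  rw [goB_nil]
  simp [dfsA, dfsv]

theorem if_len_empty (l : List Int) :
    (if l.length = 0 then ([-1] : List Int) else l) = (if l.isEmpty = true then [-1] else l) := by
  cases l <;> simp

theorem solution_eq (maps : List String) : solution maps = solution_alt maps := by
  simp only [solution, solution_alt]
  rw [show maps.foldl (fun a x => a ++ [x.toList]) ([] : List (List Char)) = maps.map (fun x => x.toList) from by
    simpa using PySem.List.foldl_append_singleton_eq_map (f := fun x : String => x.toList) (l := maps) (acc := [])]
  rw [show (List.range (((maps.map (fun x => x.toList)).getD 0 []).length)).map (fun _ => false)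
      = List.replicate (((maps.map (fun x => x.toList)).getD 0 []).length) false from by simp [List.map_const']]
  have hscan : ∀ (arr : List (List Char)) (init : List (List Bool) × List Int),
      (PySem.List.pyRange 0 (arr.length : Int) 1).foldl (fun st i =>
        (PySem.List.pyRange 0 (((arr.getD 0 []).length : Int)) 1).foldl (fun st j =>
          if vget st.1 i j = false ∧ aget arr i j ≠ 'X' then
            ((dfsA arr i j (vset st.1 i j)).1, st.2 ++ [(dfsA arr i j (vset st.1 i j)).2])
          else st) st) init
      = (PySem.List.pyRange 0 (arr.length : Int) 1).foldl (fun st i =>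
        (PySem.List.pyRange 0 (((arr.getD 0 []).length : Int)) 1).foldl (fun st j =>
          if vget st.1 i j = true ∨ aget arr i j = 'X' then st
          else ((goB arr [(i, j)] st.1 0).1, st.2 ++ [(goB arr [(i, j)] st.1 0).2])) st) init := by
    intro arr init
    congr 1
    funext st i
    congr 1
    funext st' j
    by_cases hc : vget st'.1 i j = false ∧ aget arr i j ≠ 'X'
    · rw [if_pos hc, if_neg (by rintro (h1 | h2); exacts [absurd h1 (by simp [hc.1]), hc.2 h2])]
      rw [goB_single arr i j st'.1 hc.1]
    · rw [if_neg hc, if_pos ?_]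
      cases hv : vget st'.1 i j
      · right
        by_contra hx
        exact hc ⟨hv, hx⟩
      · exact Or.inl rfl
  rw [hscan]
  exact if_len_empty _


-- ===== VERDICT (by name: the statement is the Claim_ definition above) =====
theorem solution_spec : Claim_equal_solution := by
  intro maps _ _
  exact solution_eq maps
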